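-- pv_equiv track=rewrite | github.com/huzeyfehakan/recruitment-ai-service | fastapi/app/core/processing.py | get_department_for_career_field
-- ===== SOURCE A (Python) =====
-- def get_department_for_career_field(career_field: str) -> str:
--
--     department_mapping = {
--         "Engineering & Product": ["Software Development", "Quality Assurance", "Product Management",
--                                   "Business Development",
--                                   "Design"],
--         "Partner Onboarding & Support": ["Operations", "Customer Education"],
--         "Business Customer Success": ["Sales", "Sales Operations"],
--         "Finance": ["Finance & Business Support"],
--         "Marketing": ["Marketing and Communications", "Marketing Design"],
--         "People & Culture": ["Human Resources"],
--         "MindBehind": ["MindBehind"],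
--         "Ceo’s Office": ["CEO's Executive Office"]
--     }
--     for department, fields in department_mapping.items():
--         if career_field in fields:
--             return department
--
--     return "Unknown Department"
-- ===== SOURCE B (Python) =====
-- # B: flat inverted field->department dict, single keyed lookup (no loop, no membership scans).
-- _FIELD_TO_DEPT = {
--     "Software Development": "Engineering & Product",
--     "Quality Assurance": "Engineering & Product",
--     "Product Management": "Engineering & Product",
--     "Business Development": "Engineering & Product",
--     "Design": "Engineering & Product",
--     "Operations": "Partner Onboarding & Support",
--     "Customer Education": "Partner Onboarding & Support",
--     "Sales": "Business Customer Success",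
--     "Sales Operations": "Business Customer Success",
--     "Finance & Business Support": "Finance",
--     "Marketing and Communications": "Marketing",
--     "Marketing Design": "Marketing",
--     "Human Resources": "People & Culture",
--     "MindBehind": "MindBehind",
--     "CEO's Executive Office": "Ceo\u2019s Office",
-- }
--
-- def get_department_for_career_field(career_field: str) -> str:
--     return _FIELD_TO_DEPT.get(career_field, "Unknown Department")
-- ===== Notes on version B (the rewrite author's own statement) =====
-- stated objective: idiomatic
-- what changed: Replaces the loop over department->fields lists with inner membership scans by a precomputed flat field->department dict and a single .get lookup with a default; no loop or branch remains in the function.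
import Mathlib
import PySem

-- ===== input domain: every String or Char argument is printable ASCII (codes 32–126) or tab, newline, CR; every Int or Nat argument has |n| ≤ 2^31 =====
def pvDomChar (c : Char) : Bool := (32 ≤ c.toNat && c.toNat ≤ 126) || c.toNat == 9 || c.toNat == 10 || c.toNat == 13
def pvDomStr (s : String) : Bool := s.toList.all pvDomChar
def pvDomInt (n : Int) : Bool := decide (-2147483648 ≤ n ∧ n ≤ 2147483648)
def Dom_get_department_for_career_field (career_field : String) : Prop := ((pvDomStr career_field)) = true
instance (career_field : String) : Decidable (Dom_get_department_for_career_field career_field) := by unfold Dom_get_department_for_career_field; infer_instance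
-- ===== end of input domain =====

-- B replaces A's loop-with-membership-scans by a precomputed flat field→department dict and one keyed lookup (idiomatic).

-- ===== PORT A =====
def pvDeptTable : List (String × List String) :=
  [("Engineering & Product", ["Software Development", "Quality Assurance", "Product Management",
                              "Business Development", "Design"]),
   ("Partner Onboarding & Support", ["Operations", "Customer Education"]),
   ("Business Customer Success", ["Sales", "Sales Operations"]),
   ("Finance", ["Finance & Business Support"]),
   ("Marketing", ["Marketing and Communications", "Marketing Design"]),
   ("People & Culture", ["Human Resources"]),
   ("MindBehind", ["MindBehind"]),
   ("Ceo’s Office", ["CEO's Executive Office"])]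

def pvLoopA : List (String × List String) → String → String
  | [], _ => "Unknown Department"
  | (department, fields) :: rest, career_field =>
      if fields.contains career_field then department else pvLoopA rest career_field

def get_department_for_career_field (career_field : String) : String :=
  pvLoopA pvDeptTable career_field

-- ===== PORT B =====
def pvFieldToDept : PySem.Dict String String := PySem.Dict.ofList
  [("Software Development", "Engineering & Product"),
   ("Quality Assurance", "Engineering & Product"),
   ("Product Management", "Engineering & Product"),
   ("Business Development", "Engineering & Product"),
   ("Design", "Engineering & Product"),
   ("Operations", "Partner Onboarding & Support"),
   ("Customer Education", "Partner Onboarding & Support"),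
   ("Sales", "Business Customer Success"),
   ("Sales Operations", "Business Customer Success"),
   ("Finance & Business Support", "Finance"),
   ("Marketing and Communications", "Marketing"),
   ("Marketing Design", "Marketing"),
   ("Human Resources", "People & Culture"),
   ("MindBehind", "MindBehind"),
   ("CEO's Executive Office", "Ceo’s Office")]

def get_department_for_career_field_alt (career_field : String) : String :=
  PySem.Dict.getD pvFieldToDept career_field "Unknown Department"

-- ===== PRECONDITION & SPEC =====
def Spec_get_department_for_career_field (career_field : String) (out : String) : Prop := out = get_department_for_career_field_alt career_field
instance (career_field : String) (out : String) : Decidable (Spec_get_department_for_career_field career_field out) := by unfold Spec_get_department_for_career_field; infer_instance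

-- ===== CLAIM (what is proved, stated in full; the proofs are below) =====
def Claim_equal_get_department_for_career_field : Prop := ∀ (career_field : String), Dom_get_department_for_career_field career_field → Spec_get_department_for_career_field career_field (get_department_for_career_field career_field)

-- ===== LEMMAS AND PROOFS =====

theorem pvFieldToDept_mk : pvFieldToDept = PySem.Dict.mk
  [("Software Development", "Engineering & Product"),
   ("Quality Assurance", "Engineering & Product"),
   ("Product Management", "Engineering & Product"),
   ("Business Development", "Engineering & Product"),
   ("Design", "Engineering & Product"),
   ("Operations", "Partner Onboarding & Support"),
   ("Customer Education", "Partner Onboarding & Support"),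
   ("Sales", "Business Customer Success"),
   ("Sales Operations", "Business Customer Success"),
   ("Finance & Business Support", "Finance"),
   ("Marketing and Communications", "Marketing"),
   ("Marketing Design", "Marketing"),
   ("Human Resources", "People & Culture"),
   ("MindBehind", "MindBehind"),
   ("CEO's Executive Office", "Ceo’s Office")] := by decide

-- ===== VERDICT (by name: the statement is the Claim_ definition above) =====
theorem get_department_for_career_field_spec : Claim_equal_get_department_for_career_field := by
  intro cf _
  unfold Spec_get_department_for_career_field get_department_for_career_field get_department_for_career_field_alt
  rw [pvFieldToDept_mk]
  simp only [pvDeptTable, pvLoopA, PySem.Dict.getD,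
    PySem.Dict.get?_mk_cons, List.contains_cons, List.contains_nil]
  simp only [Bool.or_eq_true, Bool.or_false, beq_iff_eq, ite_or, PySem.Dict.get?,
    apply_ite (fun o : Option String => o.getD "Unknown Department"),
    Option.getD_some, Option.getD_none, List.find?_nil, Option.map_none, eq_comm (b := cf)]
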